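-- pv_equiv track=rewrite | github.com/idank/explainshell | explainshell/roff_parser.py | _parse_roff_args
-- ===== SOURCE A (Python) =====
-- def _parse_roff_args(args_str: str) -> list:
--     """Parse roff macro arguments, handling quoted strings.
--
--     .BI "--file=" FILE → ["--file=", "FILE"]
--     .BI "-a " file → ["-a ", "file"]
--     """
--     parts = []
--     i = 0
--     while i < len(args_str):
--         if args_str[i] == '"':
--             # Find closing quote
--             end = args_str.find('"', i + 1)
--             if end == -1:
--                 parts.append(args_str[i + 1:])
--                 break
--             parts.append(args_str[i + 1:end])
--             i = end + 1
--         elif args_str[i] in (' ', '\t'):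
--             i += 1
--         else:
--             # Unquoted argument — runs to next space
--             end = i
--             while end < len(args_str) and args_str[end] not in (' ', '\t', '"'):
--                 end += 1
--             parts.append(args_str[i:end])
--             i = end
--     return parts
-- ===== SOURCE B (Python) =====
-- def _parse_roff_args(args_str: str) -> list:
--     """Parse roff macro arguments, handling quoted strings.
--
--     Consumes a shrinking suffix with lstrip/partition/slicing instead of
--     index arithmetic and an inner scanning loop.
--     """
--     parts = []
--     rest = args_str
--     while rest:
--         rest = rest.lstrip(' \t')
--         if not rest:
--             break
--         if rest[0] == '"':
--             tok, _sep, rest = rest[1:].partition('"')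
--         else:
--             cut = next((j for j, ch in enumerate(rest) if ch in ' \t"'), len(rest))
--             tok, rest = rest[:cut], rest[cut:]
--         parts.append(tok)
--     return parts
-- ===== Notes on version B (the rewrite author's own statement) =====
-- stated objective: idiomatic
-- what changed: Replaces A's manual index loop (str.find for the closing quote, an inner index-scanning while for unquoted runs) by a suffix-consuming loop built from lstrip, partition and slicing, so the per-character index arithmetic disappears into C-level string methods.
import Mathlib
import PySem

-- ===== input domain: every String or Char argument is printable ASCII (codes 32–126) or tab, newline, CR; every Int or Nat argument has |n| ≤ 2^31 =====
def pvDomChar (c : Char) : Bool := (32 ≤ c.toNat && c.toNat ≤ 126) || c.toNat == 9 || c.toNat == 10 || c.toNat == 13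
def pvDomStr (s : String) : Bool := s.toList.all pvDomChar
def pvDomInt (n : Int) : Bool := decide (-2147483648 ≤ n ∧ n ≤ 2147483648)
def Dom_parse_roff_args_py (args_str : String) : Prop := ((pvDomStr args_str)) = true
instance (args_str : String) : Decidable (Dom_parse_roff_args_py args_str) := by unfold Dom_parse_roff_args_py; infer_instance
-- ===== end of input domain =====

-- B replaces A's index-arithmetic loop (with str.find and an inner scanning loop) by a
-- suffix-consuming loop built from lstrip/partition/slicing; objective: idiomatic.

-- ===== PORT A =====

-- inner while loop of A's unquoted branch: `end = i; while end < len and s[end] not in (' ','\t','"'): end += 1`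
def pvScanEnd (s : List Char) (e : Nat) : Nat :=
  if h : e < s.length then
    if s.get ⟨e, h⟩ = ' ' ∨ s.get ⟨e, h⟩ = '\t' ∨ s.get ⟨e, h⟩ = '"' then e
    else pvScanEnd s (e + 1)
  else e
termination_by s.length - e

-- the port itself cites this for termination of the unquoted branch
theorem pvScanEnd_ge (s : List Char) (e : Nat) : e ≤ pvScanEnd s e := by
  fun_induction pvScanEnd s e <;> omega

-- A's main while loop over the index i, accumulating `parts`
def pvAloop (s : List Char) (i : Nat) (acc : List String) : List String :=
  if h : i < s.length then
    if s.get ⟨i, h⟩ = '"' then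
      -- end = args_str.find('"', i + 1)
      let e := PySem.Chars.findFrom s ['"'] ((i : Int) + 1)
      if he : e = -1 then acc ++ [String.ofList (s.drop (i + 1))]
      else pvAloop s (e.toNat + 1)
            (acc ++ [String.ofList (PySem.List.slice s (some ((i : Int) + 1)) (some e))])
    else if s.get ⟨i, h⟩ = ' ' ∨ s.get ⟨i, h⟩ = '\t' then pvAloop s (i + 1) acc
    else
      let e := pvScanEnd s i
      pvAloop s e (acc ++ [String.ofList (PySem.List.slice s (some (i : Int)) (some (e : Int)))])
  else acc
termination_by s.length - i
decreasing_by
  · have hk : i + 1 ≤ s.length := h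
    have hcast : ((i + 1 : Nat) : Int) = (i : Int) + 1 := by push_cast; ring
    have hspec := (PySem.Chars.findFrom_natCast_spec s ['"'] (i + 1) hk
      (by rw [hcast]; simpa using he)).1
    rw [hcast] at hspec
    omega
  · omega
  · have h1 : i + 1 ≤ pvScanEnd s (i + 1) := pvScanEnd_ge s (i + 1)
    have : pvScanEnd s i = pvScanEnd s (i + 1) := by
      rw [pvScanEnd]; simp only [h, dif_pos]
      split <;> simp_all
    omega

def parse_roff_args_py (args_str : String) : List String :=
  pvAloop args_str.toList 0 []

-- ===== PORT B =====

-- hand-port (exact) of `next((j for j, ch in enumerate(rest) if ch in ' \t"'), len(rest))`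
def pvFirstDelim : List Char → Nat
  | [] => 0
  | c :: r => if c = ' ' ∨ c = '\t' ∨ c = '"' then 0 else pvFirstDelim r + 1

-- cited by pvBloop's termination proof
theorem pv_dropWhile_cons_pred {p : Char → Bool} {l t : List Char} {c : Char}
    (h : l.dropWhile p = c :: t) : p c = false := by
  induction l with
  | nil => simp at h
  | cons a r ih =>
    rw [List.dropWhile_cons] at h
    by_cases hp : p a
    · rw [if_pos hp] at h; exact ih h
    · rw [if_neg hp] at h
      injection h with h1 _
      subst h1
      simpa using hp

-- cited by pvBloop's termination proof
theorem pvFirstDelim_pos (c : Char) (t : List Char)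
    (hcw : (c = ' ' || c = '\t') = false) (hcq : c ≠ '"') : 1 ≤ pvFirstDelim (c :: t) := by
  simp only [pvFirstDelim]
  rw [if_neg (by simp at hcw; tauto)]
  omega

-- B's while loop over the remaining suffix; lstrip(' \t') is ported by hand as dropWhile,
-- `if not rest / rest[0]` as the match, and partition('"') by hand as takeWhile/dropWhile
-- at the first '"' (all exact)
def pvBloop (rest : List Char) (acc : List String) : List String :=
  if rest = [] then acc
  else
    match hdw : rest.dropWhile (fun c => c = ' ' || c = '\t') with
    | [] => acc
    | c :: t =>
      if c = '"' then
        pvBloop ((t.dropWhile (· ≠ '"')).drop 1)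
          (acc ++ [String.ofList (t.takeWhile (· ≠ '"'))])
      else
        pvBloop ((c :: t).drop (pvFirstDelim (c :: t)))
          (acc ++ [String.ofList ((c :: t).take (pvFirstDelim (c :: t)))])
termination_by rest.length
decreasing_by
  · have h1 : (c :: t).length ≤ rest.length := by
      rw [← hdw]; exact List.length_dropWhile_le _ _
    have h2 := List.length_dropWhile_le (fun x => decide (x ≠ '"')) t
    simp only [List.length_drop, List.length_cons] at *
    omega
  · have h1 : (c :: t).length ≤ rest.length := by
      rw [← hdw]; exact List.length_dropWhile_le _ _
    have hcw : (c = ' ' || c = '\t') = false := pv_dropWhile_cons_pred hdw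
    have hpos : 1 ≤ pvFirstDelim (c :: t) := pvFirstDelim_pos c t hcw (by assumption)
    simp only [List.length_drop, List.length_cons] at *
    omega

def parse_roff_args_py_alt (args_str : String) : List String :=
  pvBloop args_str.toList []

-- ===== PRECONDITION & SPEC =====
def Spec_parse_roff_args_py (args_str : String) (out : List String) : Prop := out = parse_roff_args_py_alt args_str
instance (args_str : String) (out : List String) : Decidable (Spec_parse_roff_args_py args_str out) := by unfold Spec_parse_roff_args_py; infer_instance

-- ===== CLAIM (what is proved, stated in full; the proofs are below) =====
def Claim_equal_parse_roff_args_py : Prop := ∀ (args_str : String), Dom_parse_roff_args_py args_str → Spec_parse_roff_args_py args_str (parse_roff_args_py args_str)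

-- ===== LEMMAS AND PROOFS =====

theorem pv_singleton_infix (l : List Char) (c : Char) : ([c] <:+: l) ↔ c ∈ l := by
  constructor
  · intro h; exact List.singleton_sublist.mp h.sublist
  · intro h
    obtain ⟨s, t, rfl⟩ := List.append_of_mem h
    exact ⟨s, t, by simp⟩

theorem pv_dropWhile_eq_drop (p : Char → Bool) (l : List Char) :
    l.dropWhile p = l.drop (l.takeWhile p).length := by
  have := List.drop_left (l₁ := l.takeWhile p) (l₂ := l.dropWhile p)
  rw [List.takeWhile_append_dropWhile] at this
  exact this.symm

theorem pv_take_takeWhile (p : Char → Bool) (l : List Char) :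
    l.take (l.takeWhile p).length = l.takeWhile p :=
  (List.prefix_iff_eq_take.mp (List.takeWhile_prefix p)).symm

theorem pv_takeWhile_pred (p : Char → Bool) (l : List Char) (i : Nat)
    (h : i < (l.takeWhile p).length) (hl : i < l.length) : p (l[i]) = true := by
  induction l generalizing i with
  | nil => simp at hl
  | cons a t ih =>
    rw [List.takeWhile_cons] at h
    by_cases hp : p a
    · rw [if_pos hp] at h
      cases i with
      | zero => simpa using hp
      | succ j =>
        simp only [List.getElem_cons_succ]
        exact ih j (by simpa using h) (by simpa using hl)
    · rw [if_neg hp] at h; simp at h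

theorem pv_dropWhile_head (l : List Char) (c : Char) (hc : c ∈ l) :
    ∃ t, l.dropWhile (· ≠ c) = c :: t := by
  induction l with
  | nil => simp at hc
  | cons a r ih =>
    rw [List.dropWhile_cons]
    by_cases ha : a = c
    · subst ha; exact ⟨r, by simp⟩
    · rw [if_pos (by simpa using ha)]
      exact ih (by
        rcases List.mem_cons.mp hc with h | h
        · exact absurd h.symm ha
        · exact h)

-- Chars.find of a single character is the length of the run of other characters
theorem pv_find_singleton (l : List Char) (c : Char) :
    PySem.Chars.find l [c] =
      if c ∈ l then (((l.takeWhile (· ≠ c)).length : Nat) : Int) else -1 := by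
  split
  · rename_i hc
    set k := (l.takeWhile (· ≠ c)).length with hk
    have hnonneg : 0 ≤ PySem.Chars.find l [c] :=
      (PySem.Chars.find_nonneg_iff l [c]).mpr ((pv_singleton_infix l c).mpr hc)
    obtain ⟨hpre, hmin⟩ := PySem.Chars.find_spec hnonneg
    have hbefore : ∀ i < k, ¬ ([c] <+: l.drop i) := by
      intro i hik hpref
      have hlen : i < l.length :=
        lt_of_lt_of_le hik (List.takeWhile_prefix (l := l) (· ≠ c)).length_le
      have hget : l[i] = c := by
        obtain ⟨t, ht⟩ := hpref
        have h0 : l.drop i = c :: t := by simpa using ht.symm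
        have h1 : (l.drop i)[0]'(by rw [h0]; simp) = l[i + 0] := List.getElem_drop
        simp only [h0, List.getElem_cons_zero, Nat.add_zero] at h1
        exact h1.symm
      have := pv_takeWhile_pred (· ≠ c) l i hik hlen
      simp [hget] at this
    have hat : [c] <+: l.drop k := by
      obtain ⟨t, ht⟩ := pv_dropWhile_head l c hc
      rw [← pv_dropWhile_eq_drop, ht]
      exact ⟨t, rfl⟩
    have h1 : ¬ ((PySem.Chars.find l [c]).toNat < k) := fun hlt => hbefore _ hlt hpre
    have h2 : ¬ (k < (PySem.Chars.find l [c]).toNat) := fun hlt => hmin _ hlt hat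
    omega
  · rename_i hc
    exact (PySem.Chars.find_eq_neg_one_iff l [c]).mpr
      (fun h => hc ((pv_singleton_infix l c).mp h))

-- A's inner scan is the takeWhile of the delimiter predicate
theorem pv_scanEnd_eq (s : List Char) (i : Nat) :
    pvScanEnd s i =
      i + ((s.drop i).takeWhile (fun c => !(c = ' ' || c = '\t' || c = '"'))).length := by
  fun_induction pvScanEnd s i with
  | case1 e h hstop =>
    rw [List.drop_eq_getElem_cons h]
    rw [List.takeWhile_cons]
    have : (!(s[e] = ' ' || s[e] = '\t' || s[e] = '"')) = false := by
      simp only [List.get_eq_getElem] at hstop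
      simp only [Bool.not_eq_false', Bool.or_eq_true, decide_eq_true_eq]
      tauto
    rw [this]; simp
  | case2 e h hstop ih =>
    rw [List.drop_eq_getElem_cons h, List.takeWhile_cons]
    have : (!(s[e] = ' ' || s[e] = '\t' || s[e] = '"')) = true := by
      simp only [List.get_eq_getElem] at hstop
      simp only [Bool.not_eq_eq_eq_not, Bool.not_true, Bool.or_eq_false_iff,
        decide_eq_false_iff_not]
      tauto
    rw [if_pos this]
    simp only [List.length_cons, ih]
    omega
  | case3 e h =>
    rw [List.drop_eq_nil_of_le (by omega)]; simp

-- B's first-delimiter scan is the same takeWhile length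
theorem pv_firstDelim_eq (l : List Char) :
    pvFirstDelim l = (l.takeWhile (fun c => !(c = ' ' || c = '\t' || c = '"'))).length := by
  induction l with
  | nil => simp [pvFirstDelim]
  | cons c r ih =>
    simp only [pvFirstDelim, List.takeWhile_cons]
    by_cases hc : c = ' ' ∨ c = '\t' ∨ c = '"'
    · rw [if_pos hc]
      have : (!(c = ' ' || c = '\t' || c = '"')) = false := by
        simp only [Bool.not_eq_false', Bool.or_eq_true, decide_eq_true_eq]; tauto
      rw [this]; simp
    · rw [if_neg hc]
      have : (!(c = ' ' || c = '\t' || c = '"')) = true := by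
        simp only [Bool.not_eq_eq_eq_not, Bool.not_true, Bool.or_eq_false_iff,
          decide_eq_false_iff_not]
        push_neg at hc
        tauto
      rw [this]; simp [ih]

theorem pvBloop_unfold (rest : List Char) (acc : List String) :
    pvBloop rest acc =
      match rest.dropWhile (fun c => c = ' ' || c = '\t') with
      | [] => acc
      | c :: t =>
        if c = '"' then
          pvBloop ((t.dropWhile (· ≠ '"')).drop 1)
            (acc ++ [String.ofList (t.takeWhile (· ≠ '"'))])
        else
          pvBloop ((c :: t).drop (pvFirstDelim (c :: t)))
            (acc ++ [String.ofList ((c :: t).take (pvFirstDelim (c :: t)))]) := by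
  rw [pvBloop]
  by_cases hrest : rest = []
  · subst hrest; simp
  · rw [if_neg hrest]
    split
    · rename_i hdw; rw [hdw]
    · rename_i c t hdw; rw [hdw]

theorem pvBloop_nil (acc : List String) : pvBloop [] acc = acc := by
  rw [pvBloop_unfold]
  rfl

theorem pvBloop_quote (t : List Char) (acc : List String) :
    pvBloop ('"' :: t) acc =
      pvBloop ((t.dropWhile (· ≠ '"')).drop 1)
        (acc ++ [String.ofList (t.takeWhile (· ≠ '"'))]) := by
  rw [pvBloop_unfold]
  have hd : ('"' :: t).dropWhile (fun c => c = ' ' || c = '\t') = '"' :: t := by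
    rw [List.dropWhile_cons, if_neg (by simp)]
  rw [hd]
  rfl

theorem pvBloop_wsskip (c : Char) (x : List Char) (acc : List String)
    (hc : (c = ' ' || c = '\t') = true) :
    pvBloop (c :: x) acc = pvBloop x acc := by
  rw [pvBloop_unfold, pvBloop_unfold]
  have hd : (c :: x).dropWhile (fun c => c = ' ' || c = '\t')
      = x.dropWhile (fun c => c = ' ' || c = '\t') := by
    rw [List.dropWhile_cons, if_pos hc]
  rw [hd]

theorem pvBloop_tok (c : Char) (t : List Char) (acc : List String)
    (hcw : (c = ' ' || c = '\t') = false) (hcq : c ≠ '"') :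
    pvBloop (c :: t) acc =
      pvBloop ((c :: t).drop (pvFirstDelim (c :: t)))
        (acc ++ [String.ofList ((c :: t).take (pvFirstDelim (c :: t)))]) := by
  rw [pvBloop_unfold]
  have hd : (c :: t).dropWhile (fun c => c = ' ' || c = '\t') = c :: t := by
    rw [List.dropWhile_cons, hcw]
    simp
  rw [hd]
  simp only [if_neg hcq]

theorem pv_main (s : List Char) (i : Nat) (acc : List String) :
    pvAloop s i acc = pvBloop (s.drop i) acc := by
  fun_induction pvAloop s i acc with
  | case1 i acc h hq e he =>
    -- '"' at i, no closing quote
    have heq : e = PySem.Chars.findFrom s ['"'] ((i : Int) + 1) := rfl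
    clear_value e
    subst heq
    have hcast : ((i + 1 : Nat) : Int) = (i : Int) + 1 := by push_cast; ring
    have hfind : PySem.Chars.find (s.drop (i + 1)) ['"'] = -1 := by
      rw [← hcast, PySem.Chars.findFrom_natCast s ['"'] (i + 1) (by omega)] at he
      by_contra hne
      rw [if_neg hne] at he
      have := PySem.Chars.neg_one_le_find (s.drop (i + 1)) ['"']
      omega
    have hnot : '"' ∉ s.drop (i + 1) := by
      intro hmem
      rw [pv_find_singleton, if_pos hmem] at hfind
      omega
    have hdrop : s.drop i = s[i] :: s.drop (i + 1) := List.drop_eq_getElem_cons h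
    simp only [List.get_eq_getElem] at hq
    rw [hdrop, hq, pvBloop_quote]
    have htok : (s.drop (i + 1)).takeWhile (· ≠ '"') = s.drop (i + 1) :=
      List.takeWhile_eq_self_iff.mpr (fun x hx => by
        simp only [decide_eq_true_eq]; exact fun hxc => hnot (hxc ▸ hx))
    have hdw : (s.drop (i + 1)).dropWhile (· ≠ '"') = [] :=
      List.dropWhile_eq_nil_iff.mpr (fun x hx => by
        simp only [decide_eq_true_eq]; exact fun hxc => hnot (hxc ▸ hx))
    rw [htok, hdw]
    simp [pvBloop_nil]
  | case2 i acc h hq e he ih =>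
    -- '"' at i, closing quote found
    have heq : e = PySem.Chars.findFrom s ['"'] ((i : Int) + 1) := rfl
    clear_value e
    subst heq
    have hcast : ((i + 1 : Nat) : Int) = (i : Int) + 1 := by push_cast; ring
    have hmem : '"' ∈ s.drop (i + 1) := by
      by_contra hmem
      apply he
      have hf : PySem.Chars.find (s.drop (i + 1)) ['"'] = -1 := by
        rw [pv_find_singleton, if_neg hmem]
      rw [← hcast, PySem.Chars.findFrom_natCast s ['"'] (i + 1) (by omega), hf]
      simp
    set k := ((s.drop (i + 1)).takeWhile (· ≠ '"')).length with hk
    have hfind : PySem.Chars.find (s.drop (i + 1)) ['"'] = (k : Int) := by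
      rw [pv_find_singleton, if_pos hmem]
    have he' : PySem.Chars.findFrom s ['"'] ((i : Int) + 1) = ((i + 1 + k : Nat) : Int) := by
      rw [← hcast, PySem.Chars.findFrom_natCast s ['"'] (i + 1) (by omega), hfind]
      rw [if_neg (by omega)]
      push_cast; ring
    have hslice : PySem.List.slice s (some ((i : Int) + 1))
        (some (PySem.Chars.findFrom s ['"'] ((i : Int) + 1)))
        = (s.drop (i + 1)).takeWhile (· ≠ '"') := by
      rw [he', ← hcast, PySem.List.slice_natCast]
      rw [show i + 1 + k - (i + 1) = k from by omega]
      rw [hk]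
      exact pv_take_takeWhile _ _
    rw [hslice] at ih ⊢
    rw [ih, he']
    simp only [Int.toNat_natCast]
    have hdrop : s.drop i = s[i] :: s.drop (i + 1) := List.drop_eq_getElem_cons h
    simp only [List.get_eq_getElem] at hq
    rw [hdrop, hq, pvBloop_quote]
    congr 1
    rw [pv_dropWhile_eq_drop, List.drop_drop, List.drop_drop]
    all_goals congr 1
  | case3 i acc h hq hws ih =>
    -- whitespace at i
    rw [ih, List.drop_eq_getElem_cons h]
    refine (pvBloop_wsskip s[i] (s.drop (i + 1)) acc ?_).symm
    simp only [List.get_eq_getElem] at hws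
    simp only [Bool.or_eq_true, decide_eq_true_eq]
    tauto
  | case4 i acc h hq hws e ih =>
    -- unquoted token at i
    have heq : e = pvScanEnd s i := rfl
    clear_value e
    subst heq
    simp only [List.get_eq_getElem] at hq hws
    push_neg at hws
    have hcw : (s[i] = ' ' || s[i] = '\t') = false := by
      simp only [Bool.or_eq_false_iff, decide_eq_false_iff_not]
      tauto
    have hscan : pvScanEnd s i
        = i + ((s.drop i).takeWhile (fun c => !(c = ' ' || c = '\t' || c = '"'))).length :=
      pv_scanEnd_eq s i
    have hdrop : s.drop i = s[i] :: s.drop (i + 1) := List.drop_eq_getElem_cons h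
    have hslice : PySem.List.slice s (some (i : Int)) (some ((pvScanEnd s i : Nat) : Int))
        = (s.drop i).take (pvFirstDelim (s.drop i)) := by
      rw [PySem.List.slice_natCast, hscan, Nat.add_sub_cancel_left,
        pv_firstDelim_eq, pv_take_takeWhile]
    rw [hslice] at ih ⊢
    rw [ih, hscan, ← List.drop_drop, ← pv_firstDelim_eq, hdrop]
    exact (pvBloop_tok s[i] (s.drop (i + 1)) acc hcw hq).symm
  | case5 i acc h =>
    rw [List.drop_eq_nil_of_le (by omega), pvBloop_nil]

-- ===== VERDICT (by name: the statement is the Claim_ definition above) =====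
theorem parse_roff_args_py_spec : Claim_equal_parse_roff_args_py := by
  intro s _
  unfold Spec_parse_roff_args_py parse_roff_args_py parse_roff_args_py_alt
  simpa using pv_main s.toList 0 []
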